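-- pv_equiv track=rewrite | github.com/darkshoxx/LeetCodeCode | 802/my_sol.py | eventualSafeNodes
-- ===== SOURCE A (Python) =====
-- from typing import List
--
-- def eventualSafeNodes(graph: List[List[int]]) -> List[int]:
--     safe_nodes = []
--     nodes_added = True
--     length = len(graph)
--     rep_graph = [None]*length
--     while nodes_added:
--         nodes_added = False
--         for i in range(length):
--             if rep_graph[i] is None:
--                 # if graph[i] == []:
--                 #     safe_nodes.append(i)
--                 #     nodes_added = True
--                 #     rep_graph[i] = 0
--                 all_safe = True
--                 for target in graph[i]:
--                     if target not in safe_nodes: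
--                         all_safe = False
--                 if all_safe:
--                     safe_nodes.append(i)
--                     nodes_added = True
--                     rep_graph[i] = 0
--     return sorted(safe_nodes)
-- ===== SOURCE B (Python) =====
-- def eventualSafeNodes(graph):
--     n = len(graph)
--     outdeg = [len(nbrs) for nbrs in graph]
--     rev = [[] for _ in range(n)]
--     for u in range(n):
--         for t in graph[u]:
--             if 0 <= t < n:
--                 rev[t].append(u)
--     safe = [d == 0 for d in outdeg]
--     queue = [u for u in range(n) if outdeg[u] == 0]
--     head = 0
--     while head < len(queue):
--         t = queue[head]
--         head += 1
--         for u in rev[t]: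
--             outdeg[u] -= 1
--             if outdeg[u] == 0:
--                 safe[u] = True
--                 queue.append(u)
--     return [u for u in range(n) if safe[u]]
-- ===== Notes on version B (the rewrite author's own statement) =====
-- stated objective: alternative
-- what changed: Replaces A's repeated full-graph sweeps (each re-testing every node's successors against a growing safe list) by a reverse-graph Kahn elimination: build reverse adjacency lists and outdegree counters once, seed a queue with sink nodes, and pop each node exactly once while decrementing its predecessors' counters.
import Mathlib
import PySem

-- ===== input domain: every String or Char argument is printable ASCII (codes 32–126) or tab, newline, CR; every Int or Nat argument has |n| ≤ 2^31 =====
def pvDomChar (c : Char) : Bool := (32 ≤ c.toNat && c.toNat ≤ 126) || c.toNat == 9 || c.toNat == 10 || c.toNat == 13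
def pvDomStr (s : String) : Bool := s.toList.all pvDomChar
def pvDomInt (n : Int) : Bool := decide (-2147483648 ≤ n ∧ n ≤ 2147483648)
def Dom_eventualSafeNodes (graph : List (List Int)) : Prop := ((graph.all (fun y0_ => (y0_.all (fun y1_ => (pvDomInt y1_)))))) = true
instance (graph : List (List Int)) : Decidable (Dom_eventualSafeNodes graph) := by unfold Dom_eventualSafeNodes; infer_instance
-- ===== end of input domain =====

-- B replaces A's repeated whole-graph sweeps by a single reverse-graph Kahn elimination
-- (build reverse adjacency and outdegrees once, then a worklist/queue of safe nodes).

-- ===== PORT A =====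
-- one step of A's inner 'for i in range(length)' body; state = (safe_nodes, rep_graph, nodes_added)
def pvPassStep (graph : List (List Int)) (st : List Int × List (Option Int) × Bool) (i : Nat) :
    List Int × List (Option Int) × Bool :=
  let safe := st.1; let rep := st.2.1; let added := st.2.2
  if rep.getD i none = none then
    -- all_safe accumulator over graph[i], exactly A's inner loop (no break)
    let allSafe := (graph.getD i []).foldl (fun b t => if !(safe.contains t) then false else b) true
    if allSafe then (safe ++ [(i : Int)], rep.set i (some 0), true) else (safe, rep, added)
  else (safe, rep, added)

-- A's 'while nodes_added' loop; the fuel (length+2) always suffices: every continuing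
-- iteration appends at least one node, so the fuel-0 branch is unreachable (proved below)
def pvLoopA (graph : List (List Int)) : Nat → List Int → List (Option Int) → List Int
  | 0, safe, _ => PySem.List.sorted safe (fun x => x) false
  | fuel+1, safe, rep =>
    let st := (List.range graph.length).foldl (pvPassStep graph) (safe, rep, false)
    if st.2.2 then pvLoopA graph fuel st.1 st.2.1
    else PySem.List.sorted st.1 (fun x => x) false

def eventualSafeNodes (graph : List (List Int)) : List Int :=
  pvLoopA graph (graph.length + 2) [] (List.replicate graph.length none)

-- ===== PORT B =====
-- 'if 0 <= t < n: rev[t].append(u)' — one edge insertion into the reverse adjacency lists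
def pvRevIns (n : Nat) (u : Nat) (rev : List (List Nat)) (t : Int) : List (List Nat) :=
  if 0 ≤ t ∧ t < (n : Int) then rev.modify t.toNat (fun l => l ++ [u]) else rev

-- 'for u in range(n): for t in graph[u]: …' building rev
def pvBuildRev (graph : List (List Int)) : List (List Nat) :=
  (List.range graph.length).foldl
    (fun rev u => (graph.getD u []).foldl (pvRevIns graph.length u) rev)
    (List.replicate graph.length [])

-- body of 'for u in rev[t]': outdeg[u] -= 1; if outdeg[u] == 0: safe[u] = True; queue.append(u)
def pvRelax (st : List Int × List Bool × List Nat) (u : Nat) : List Int × List Bool × List Nat :=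
  let od := st.1.modify u (fun d => d - 1)
  if od.getD u 0 = 0 then (od, st.2.1.set u true, st.2.2 ++ [u]) else (od, st.2.1, st.2.2)

-- 'while head < len(queue)': the un-consumed part of the queue is the pending list;
-- the fuel (length+1) always suffices: each iteration consumes one of at most n
-- distinct enqueued nodes, so the fuel-0 branch is unreachable (proved below)
def pvBFS (rev : List (List Nat)) : Nat → List Int → List Bool → List Nat → List Bool
  | 0, _, safe, _ => safe
  | _+1, _, safe, [] => safe
  | fuel+1, od, safe, t :: rest =>
    let st := (rev.getD t []).foldl pvRelax (od, safe, rest)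
    pvBFS rev fuel st.1 st.2.1 st.2.2

def eventualSafeNodes_alt (graph : List (List Int)) : List Int :=
  let outdeg := graph.map (fun nbrs => ((nbrs.length : Int)))
  let res := pvBFS (pvBuildRev graph) (graph.length + 1) outdeg
      (outdeg.map (fun d => decide (d = 0)))
      ((List.range graph.length).filter (fun u => decide (outdeg.getD u 0 = 0)))
  ((List.range graph.length).filter (fun u => res.getD u false)).map (fun u => Int.ofNat u)

-- ===== PRECONDITION & SPEC =====
def Spec_eventualSafeNodes (graph : List (List Int)) (out : List Int) : Prop := out = eventualSafeNodes_alt graph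
instance (graph : List (List Int)) (out : List Int) : Decidable (Spec_eventualSafeNodes graph out) := by unfold Spec_eventualSafeNodes; infer_instance

-- ===== CLAIM (what is proved, stated in full; the proofs are below) =====
def Claim_equal_eventualSafeNodes : Prop := ∀ (graph : List (List Int)), Dom_eventualSafeNodes graph → Spec_eventualSafeNodes graph (eventualSafeNodes graph)

-- ===== LEMMAS AND PROOFS =====

-- the common characterisation: x is (a Python int naming) an eventually safe node
inductive SafeI (graph : List (List Int)) : Int → Prop
  | mk (x : Int) (h0 : 0 ≤ x) (h1 : x.toNat < graph.length)
      (h : ∀ t ∈ graph.getD x.toNat [], SafeI graph t) : SafeI graph x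

lemma SafeI_elim {graph : List (List Int)} {x : Int} (h : SafeI graph x) :
    0 ≤ x ∧ x.toNat < graph.length ∧ ∀ t ∈ graph.getD x.toNat [], SafeI graph t := by
  cases h with | mk x h0 h1 h => exact ⟨h0, h1, h⟩

-- a list that represents THE safe set
def GoodS (graph : List (List Int)) (s : List Int) : Prop :=
  s.Nodup ∧ ∀ x : Int, x ∈ s ↔ SafeI graph x

lemma good_length_le {graph : List (List Int)} {s : List Int}
    (hnd : s.Nodup) (hmem : ∀ x ∈ s, SafeI graph x) : s.length ≤ graph.length := by
  have hsub : s ⊆ (List.range graph.length).map (fun j => Int.ofNat j) := by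
    intro x hx
    obtain ⟨h0, h1, -⟩ := SafeI_elim (hmem x hx)
    exact List.mem_map.mpr ⟨x.toNat, List.mem_range.mpr h1, Int.toNat_of_nonneg h0⟩
  have := (hnd.subperm hsub).length_le
  simpa using this

lemma foldl_allSafe (safe : List Int) (l : List Int) (b : Bool) :
    l.foldl (fun b t => if !(safe.contains t) then false else b) b
      = (b && l.all (fun t => safe.contains t)) := by
  induction l generalizing b with
  | nil => simp
  | cons a l ih =>
      simp only [List.foldl_cons, List.all_cons, ih]
      cases h : safe.contains a <;> simp

-- A's loop invariant
def InvA (graph : List (List Int)) (safe : List Int) (rep : List (Option Int)) : Prop :=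
  rep.length = graph.length ∧ safe.Nodup ∧ (∀ x ∈ safe, SafeI graph x) ∧
  (∀ j : Nat, j < graph.length → (rep.getD j none ≠ none ↔ (Int.ofNat j ∈ safe)))

lemma pass_fold (graph : List (List Int)) :
    ∀ (l : List Nat), (∀ j ∈ l, j < graph.length) → ∀ s0 rep0 a0, InvA graph s0 rep0 →
    (fun st : List Int × List (Option Int) × Bool =>
      InvA graph st.1 st.2.1 ∧ (∃ d, st.1 = s0 ++ d) ∧
      (st.2.2 = false → a0 = false ∧ st.1 = s0 ∧
        ∀ j ∈ l, (∀ t ∈ graph.getD j [], t ∈ s0) → (Int.ofNat j ∈ s0)) ∧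
      (a0 = false → st.2.2 = true → s0.length < st.1.length))
    (l.foldl (pvPassStep graph) (s0, rep0, a0)) := by
  intro l
  induction l with
  | nil =>
      intro _ s0 rep0 a0 hInv
      exact ⟨hInv, ⟨[], by simp⟩, fun h => ⟨h, rfl, by simp⟩, fun h0 h1 => by rw [h0] at h1; cases h1⟩
  | cons j l ihl =>
      intro hl s0 rep0 a0 hInv
      have hj : j < graph.length := hl j (by simp)
      have hl' : ∀ i ∈ l, i < graph.length := fun i hi => hl i (by simp [hi])
      rw [List.foldl_cons]
      by_cases hrep : rep0.getD j none = none
      · by_cases hall : (graph.getD j []).all (fun t => s0.contains t) = true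
        · -- node j is appended
          have hfold : (graph.getD j []).foldl (fun b t => if !(s0.contains t) then false else b) true = true := by
            rw [foldl_allSafe, Bool.true_and]; exact hall
          have hstep : pvPassStep graph (s0, rep0, a0) j
              = (s0 ++ [Int.ofNat j], rep0.set j (some 0), true) := by
            simp only [pvPassStep]
            rw [if_pos hrep, hfold]
            rfl
          have hnotmem : Int.ofNat j ∉ s0 := by
            intro hm
            exact ((hInv.2.2.2 j hj).mpr hm) hrep
          have hmemT : ∀ t ∈ graph.getD j [], t ∈ s0 := by
            intro t ht
            exact List.contains_iff_mem.mp (List.all_eq_true.mp hall t ht)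
          have hSafeJ : SafeI graph (Int.ofNat j) := by
            refine SafeI.mk _ (Int.natCast_nonneg j) ?_ ?_
            · exact hj
            · intro t ht
              exact hInv.2.2.1 t (hmemT t ht)
          have hInv1 : InvA graph (s0 ++ [Int.ofNat j]) (rep0.set j (some 0)) := by
            refine ⟨by simp [hInv.1], ?_, ?_, ?_⟩
            · exact hInv.2.1.append (List.nodup_singleton _)
                (fun a ha hb => by simp at hb; subst hb; exact hnotmem ha)
            · intro x hx
              rcases List.mem_append.mp hx with hx | hx
              · exact hInv.2.2.1 x hx
              · simp at hx; exact hx ▸ hSafeJ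
            · intro j' hj'
              by_cases hjj : j' = j
              · subst hjj
                have h2 : (rep0.set j' (some 0)).getD j' none = some 0 := by
                  have : j' < rep0.length := by rw [hInv.1]; exact hj'
                  simp [List.getD, this]
                rw [h2]
                simp
              · have h2 : (rep0.set j (some 0)).getD j' none = rep0.getD j' none := by
                  simp [List.getD, List.getElem?_set_ne (Ne.symm hjj)]
                rw [h2]
                have hne : Int.ofNat j' ≠ Int.ofNat j := fun h => hjj (Int.ofNat.inj h)
                rw [hInv.2.2.2 j' hj']
                simp [hjj]
          rw [hstep]
          obtain ⟨P1, ⟨d, hd⟩, P3, P4⟩ := ihl hl' (s0 ++ [Int.ofNat j]) (rep0.set j (some 0)) true hInv1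
          refine ⟨P1, ⟨Int.ofNat j :: d, by rw [hd]; simp⟩, ?_, ?_⟩
          · intro hfin
            obtain ⟨hc, -, -⟩ := P3 hfin
            cases hc
          · intro _ _
            rw [hd]
            simp only [List.length_append, List.length_cons, List.length_nil]
            omega
        · -- all_safe false: state unchanged
          have hfold : (graph.getD j []).foldl (fun b t => if !(s0.contains t) then false else b) true = false := by
            rw [foldl_allSafe, Bool.true_and]; exact Bool.eq_false_iff.mpr hall
          have hstep : pvPassStep graph (s0, rep0, a0) j = (s0, rep0, a0) := by
            simp only [pvPassStep]
            rw [if_pos hrep, hfold]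
            rfl
          rw [hstep]
          obtain ⟨P1, P2, P3, P4⟩ := ihl hl' s0 rep0 a0 hInv
          refine ⟨P1, P2, ?_, P4⟩
          intro hfin
          obtain ⟨ha0, hs, hcl⟩ := P3 hfin
          refine ⟨ha0, hs, ?_⟩
          intro i hi hmem
          rcases List.mem_cons.mp hi with rfl | hi
          · exact absurd (List.all_eq_true.mpr
              (fun t ht => List.contains_iff_mem.mpr (hmem t ht))) hall
          · exact hcl i hi hmem
      · -- rep_graph[j] already set: state unchanged
        have hstep : pvPassStep graph (s0, rep0, a0) j = (s0, rep0, a0) := by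
          simp only [pvPassStep]
          rw [if_neg hrep]
        rw [hstep]
        obtain ⟨P1, P2, P3, P4⟩ := ihl hl' s0 rep0 a0 hInv
        refine ⟨P1, P2, ?_, P4⟩
        intro hfin
        obtain ⟨ha0, hs, hcl⟩ := P3 hfin
        refine ⟨ha0, hs, ?_⟩
        intro i hi hmem
        rcases List.mem_cons.mp hi with rfl | hi
        · exact (hInv.2.2.2 i hj).mp hrep
        · exact hcl i hi hmem

lemma safe_complete {graph : List (List Int)} {safe : List Int}
    (hcl : ∀ j : Nat, j < graph.length → (∀ t ∈ graph.getD j [], t ∈ safe) → (Int.ofNat j ∈ safe)) :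
    ∀ x, SafeI graph x → x ∈ safe := by
  intro x h
  induction h with
  | mk x h0 h1 h ih =>
      have := hcl x.toNat h1 (fun t ht => ih t ht)
      rwa [show Int.ofNat x.toNat = x from Int.toNat_of_nonneg h0] at this

lemma loopA_correct (graph : List (List Int)) :
    ∀ fuel safe rep, InvA graph safe rep → graph.length + 1 ≤ fuel + safe.length →
    ∃ s, GoodS graph s ∧ pvLoopA graph fuel safe rep = PySem.List.sorted s (fun x => x) false := by
  intro fuel
  induction fuel with
  | zero =>
      intro safe rep hInv hf
      exact absurd (good_length_le hInv.2.1 hInv.2.2.1) (by omega)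
  | succ fuel ih =>
      intro safe rep hInv hf
      obtain ⟨P1, ⟨d, hd⟩, P3, P4⟩ :=
        pass_fold graph (List.range graph.length) (fun j hj => List.mem_range.mp hj) safe rep false hInv
      have hunf : pvLoopA graph (fuel+1) safe rep =
          (if ((List.range graph.length).foldl (pvPassStep graph) (safe, rep, false)).2.2 then
            pvLoopA graph fuel ((List.range graph.length).foldl (pvPassStep graph) (safe, rep, false)).1
              ((List.range graph.length).foldl (pvPassStep graph) (safe, rep, false)).2.1
          else PySem.List.sorted ((List.range graph.length).foldl (pvPassStep graph) (safe, rep, false)).1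
            (fun x => x) false) := rfl
      by_cases ha : ((List.range graph.length).foldl (pvPassStep graph) (safe, rep, false)).2.2 = true
      · rw [hunf, if_pos ha]
        have hlt := P4 rfl ha
        exact ih _ _ P1 (by omega)
      · have hb : ((List.range graph.length).foldl (pvPassStep graph) (safe, rep, false)).2.2 = false :=
          Bool.eq_false_iff.mpr ha
        obtain ⟨-, hs, hcl⟩ := P3 hb
        rw [hunf, if_neg ha, hs]
        refine ⟨safe, ⟨hs ▸ P1.2.1, fun x => ⟨fun hx => (hs ▸ P1.2.2.1) x hx, ?_⟩⟩, rfl⟩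
        intro hx
        refine safe_complete (fun j hj hmem => ?_) x hx
        exact hcl j (List.mem_range.mpr hj) hmem

-- ===== B-side lemmas =====

-- getD glue for set/modify
lemma getD_modify_self {α : Type} {l : List α} {i : Nat} (f : α → α) (d : α) (h : i < l.length) :
    (l.modify i f).getD i d = f (l.getD i d) := by
  simp [List.getD, List.getElem?_eq_getElem h]

lemma getD_modify_ne {α : Type} {l : List α} {i j : Nat} (f : α → α) (d : α) (h : i ≠ j) :
    (l.modify i f).getD j d = l.getD j d := by
  simp [List.getD, h]

lemma getD_set_self {α : Type} {l : List α} {i : Nat} (a d : α) (h : i < l.length) :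
    (l.set i a).getD i d = a := by
  simp [List.getD, h]

lemma getD_set_ne {α : Type} {l : List α} {i j : Nat} (a d : α) (h : i ≠ j) :
    (l.set i a).getD j d = l.getD j d := by
  simp [List.getD, List.getElem?_set_ne h]

-- remaining outdegree of u once the nodes of P have been eliminated
def pvCnt (graph : List (List Int)) (P : List Nat) (u : Nat) : Int :=
  (((graph.getD u []).countP
    (fun x => decide (¬(0 ≤ x ∧ x < (graph.length : Int) ∧ x.toNat ∈ P)))) : Int)

lemma cnt_nonneg (graph : List (List Int)) (P : List Nat) (u : Nat) : 0 ≤ pvCnt graph P u := by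
  exact Int.natCast_nonneg _

-- eliminating one more node t splits the count
lemma cntP_split {n t : Nat} (P : List Nat) (ht : t < n) (htP : t ∉ P) :
    ∀ l : List Int,
      l.countP (fun x => decide (¬(0 ≤ x ∧ x < (n : Int) ∧ x.toNat ∈ P)))
        = l.countP (fun x => decide (¬(0 ≤ x ∧ x < (n : Int) ∧ x.toNat ∈ P ++ [t])))
          + l.count ((t : Nat) : Int) := by
  intro l
  induction l with
  | nil => simp
  | cons x l ih =>
      rw [List.countP_cons, List.countP_cons, List.count_cons, ih]
      have hsplit : (if (decide (¬(0 ≤ x ∧ x < (n : Int) ∧ x.toNat ∈ P))) = true then 1 else 0)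
          = (if (decide (¬(0 ≤ x ∧ x < (n : Int) ∧ x.toNat ∈ P ++ [t]))) = true then 1 else 0)
            + (if (x == ((t : Nat) : Int)) = true then 1 else 0) := by
        by_cases hx : x = ((t : Nat) : Int)
        · simp [hx]
          rw [if_pos (Or.inr htP), if_neg (by omega : ¬ n ≤ t)]
        · simp [hx]
          rcases Classical.em (x.toNat ∈ P) with hm | hm
          · simp [hm]
          · simp [hm]
            intros
            omega
      omega

lemma cnt_pop {graph : List (List Int)} {t : Nat} (P : List Nat)
    (ht : t < graph.length) (htP : t ∉ P) (u : Nat) :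
    pvCnt graph P u = pvCnt graph (P ++ [t]) u + (((graph.getD u []).count ((t : Nat) : Int) : Int)) := by
  unfold pvCnt
  rw [cntP_split P ht htP (graph.getD u [])]
  push_cast
  ring

-- the reverse-adjacency build: length, element bound, and occurrence count
lemma revIns_fold_length (n u : Nat) :
    ∀ (ts : List Int) (rev : List (List Nat)),
      (ts.foldl (pvRevIns n u) rev).length = rev.length := by
  intro ts
  induction ts with
  | nil => intro rev; rfl
  | cons x ts ih =>
      intro rev
      rw [List.foldl_cons, ih]
      unfold pvRevIns
      split_ifs <;> simp

lemma revIns_fold_count (n u : Nat) (t w : Nat) (ht : t < n) :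
    ∀ (ts : List Int) (rev : List (List Nat)), rev.length = n →
      ((ts.foldl (pvRevIns n u) rev).getD t []).count w
        = ((rev.getD t []).count w) + (if w = u then ts.count ((t : Nat) : Int) else 0) := by
  intro ts
  induction ts with
  | nil => intro rev _; simp
  | cons x ts ih =>
      intro rev hlen
      rw [List.foldl_cons]
      have hlen' : (pvRevIns n u rev x).length = n := by
        unfold pvRevIns; split_ifs <;> simp [hlen]
      rw [ih _ hlen']
      by_cases hx : x = ((t : Nat) : Int)
      · subst hx
        have hin : 0 ≤ ((t:Nat):Int) ∧ ((t:Nat):Int) < (n : Int) := by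
          constructor
          · exact Int.natCast_nonneg t
          · exact_mod_cast ht
        have hstep : pvRevIns n u rev ((t:Nat):Int) = rev.modify t (fun l => l ++ [u]) := by
          unfold pvRevIns
          rw [if_pos hin, Int.toNat_natCast]
        rw [hstep, getD_modify_self _ _ (by rw [hlen]; exact ht), List.count_append,
          List.count_cons_self]
        by_cases hwu : w = u
        · subst hwu
          rw [if_pos rfl, if_pos rfl, List.count_cons, List.count_nil]
          simp
          omega
        · have h1 : ([u].count w) = 0 := by
            rw [List.count_cons, List.count_nil]
            simp [Ne.symm hwu]
          rw [h1]
          simp [hwu]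
      · have hstep : (pvRevIns n u rev x).getD t [] = rev.getD t [] := by
          unfold pvRevIns
          split_ifs with h
          · exact getD_modify_ne _ _ (by omega)
          · rfl
        rw [hstep, List.count_cons]
        have : (x == ((t:Nat):Int)) = false := by simpa using hx
        rw [this]
        simp

lemma revIns_fold_bound (n u : Nat) (hu : u < n) :
    ∀ (ts : List Int) (rev : List (List Nat)),
      (∀ t' : Nat, ∀ v ∈ rev.getD t' [], v < n) →
      (∀ t' : Nat, ∀ v ∈ (ts.foldl (pvRevIns n u) rev).getD t' [], v < n) := by
  intro ts
  induction ts with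
  | nil => intro rev h; exact h
  | cons x ts ih =>
      intro rev h
      rw [List.foldl_cons]
      apply ih
      intro t' v hv
      unfold pvRevIns at hv
      split_ifs at hv with hc
      · by_cases he : x.toNat = t'
        · by_cases hlt : t' < rev.length
          · rw [he, getD_modify_self _ _ hlt] at hv
            rcases List.mem_append.mp hv with hm | hm
            · exact h t' v hm
            · simp at hm; omega
          · rw [he] at hv
            rw [List.getD, List.getElem?_eq_none (by simp; omega)] at hv
            simp at hv
        · rw [getD_modify_ne _ _ he] at hv
          exact h t' v hv
      · exact h t' v hv

lemma buildRev_bound (graph : List (List Int)) :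
    ∀ t : Nat, ∀ v ∈ (pvBuildRev graph).getD t [], v < graph.length := by
  unfold pvBuildRev
  have h : ∀ (us : List Nat), (∀ u ∈ us, u < graph.length) → ∀ (rev : List (List Nat)),
      (∀ t : Nat, ∀ v ∈ rev.getD t [], v < graph.length) →
      (∀ t : Nat, ∀ v ∈ (us.foldl (fun rev u => (graph.getD u []).foldl (pvRevIns graph.length u) rev) rev).getD t [], v < graph.length) := by
    intro us
    induction us with
    | nil => intro _ rev h; exact h
    | cons u us ih =>
        intro hus rev h
        rw [List.foldl_cons]
        exact ih (fun v hv => hus v (by simp [hv]))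
          _ (revIns_fold_bound graph.length u (hus u (by simp)) _ _ h)
  apply h (List.range graph.length) (fun u hu => List.mem_range.mp hu)
  intro t v hv
  by_cases hlt : t < graph.length
  · rw [List.getD, List.getElem?_replicate] at hv
    simp [hlt] at hv
  · rw [List.getD, List.getElem?_eq_none (by simp; omega)] at hv
    simp at hv

lemma buildRev_count (graph : List (List Int)) (t w : Nat) (ht : t < graph.length) (hw : w < graph.length) :
    ((pvBuildRev graph).getD t []).count w = (graph.getD w []).count ((t : Nat) : Int) := by
  unfold pvBuildRev
  have h : ∀ (us : List Nat) (rev : List (List Nat)), rev.length = graph.length →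
      ((us.foldl (fun rev u => (graph.getD u []).foldl (pvRevIns graph.length u) rev) rev).getD t []).count w
        = ((rev.getD t []).count w) + (us.count w) * (graph.getD w []).count ((t : Nat) : Int) := by
    intro us
    induction us with
    | nil => intro rev _; simp
    | cons u us ih =>
        intro rev hlen
        rw [List.foldl_cons, ih _ (by rw [revIns_fold_length]; exact hlen),
          revIns_fold_count graph.length u t w ht _ _ hlen, List.count_cons]
        by_cases he : w = u
        · subst he
          rw [if_pos rfl]
          simp [Nat.add_mul]
          omega
        · have huw : (u == w) = false := by simpa using (Ne.symm he)
          rw [if_neg he, huw]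
          simp
  rw [h (List.range graph.length) _ (by simp)]
  have hrep : ((List.replicate graph.length ([] : List Nat)).getD t []).count w = 0 := by
    rw [List.getD, List.getElem?_replicate]
    simp [ht]
  rw [hrep, List.count_eq_one_of_mem (List.nodup_range) (List.mem_range.mpr hw)]
  simp

-- the BFS loop-head invariant
def BfsInv (graph : List (List Int)) (P : List Nat) (od : List Int) (safe : List Bool) (pending : List Nat) : Prop :=
  od.length = graph.length ∧ safe.length = graph.length ∧
  (∀ u : Nat, u < graph.length → od.getD u 0 = pvCnt graph P u) ∧
  (∀ u : Nat, u < graph.length → (safe.getD u false = true ↔ od.getD u 0 ≤ 0)) ∧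
  (P ++ pending).Nodup ∧
  (∀ u ∈ P ++ pending, u < graph.length ∧ safe.getD u false = true) ∧
  (∀ u : Nat, u < graph.length → safe.getD u false = true → u ∈ P ++ pending) ∧
  (∀ u ∈ P ++ pending, SafeI graph (Int.ofNat u))

lemma relax_fold (graph : List (List Int)) (P : List Nat) :
    ∀ (L : List Nat) (od : List Int) (safe : List Bool) (pending : List Nat),
      (∀ u ∈ L, u < graph.length) →
      od.length = graph.length → safe.length = graph.length →
      (∀ u : Nat, u < graph.length → od.getD u 0 = pvCnt graph P u + ((L.count u : Nat) : Int)) →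
      (∀ u : Nat, u < graph.length → (safe.getD u false = true ↔ od.getD u 0 ≤ 0)) →
      (P ++ pending).Nodup →
      (∀ u ∈ P ++ pending, u < graph.length ∧ safe.getD u false = true) →
      (∀ u : Nat, u < graph.length → safe.getD u false = true → u ∈ P ++ pending) →
      (∀ u ∈ P ++ pending, SafeI graph (Int.ofNat u)) →
      BfsInv graph P (L.foldl pvRelax (od, safe, pending)).1
        (L.foldl pvRelax (od, safe, pending)).2.1 (L.foldl pvRelax (od, safe, pending)).2.2 := by
  intro L
  induction L with
  | nil =>
      intro od safe pending _ h1 h2 h3 h4 h5 h6 h7 h8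
      refine ⟨h1, h2, ?_, h4, h5, h6, h7, h8⟩
      intro u hu
      have := h3 u hu
      simpa using this
  | cons v L ih =>
      intro od safe pending hL h1 h2 h3 h4 h5 h6 h7 h8
      have hv : v < graph.length := hL v (by simp)
      have hvlen : v < od.length := by omega
      rw [List.foldl_cons]
      have hod' : ∀ u : Nat, (od.modify v (fun d => d - 1)).getD u 0
          = if u = v then od.getD v 0 - 1 else od.getD u 0 := by
        intro u
        by_cases he : u = v
        · subst he; rw [if_pos rfl, getD_modify_self _ _ hvlen]
        · rw [if_neg he, getD_modify_ne _ _ (Ne.symm he)]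
      by_cases h0 : (od.modify v (fun d => d - 1)).getD v 0 = 0
      · -- outdeg hit 0: mark safe, enqueue
        have hstep : pvRelax (od, safe, pending) v
            = (od.modify v (fun d => d - 1), safe.set v true, pending ++ [v]) := by
          unfold pvRelax
          rw [if_pos h0]
        rw [hstep]
        have hodv : od.getD v 0 = 1 := by
          have := hod' v
          rw [if_pos rfl] at this
          omega
        have hvnot : v ∉ P ++ pending := by
          intro hm
          have := (h6 v hm).2
          have := (h4 v hv).mp this
          omega
        have hnd' : (P ++ (pending ++ [v])).Nodup := by
          rw [← List.append_assoc]
          refine List.Nodup.append h5 (List.nodup_singleton _) ?_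
          intro a ha hb
          simp at hb
          subst hb
          exact hvnot ha
        have hsafev : SafeI graph (Int.ofNat v) := by
          have hcnt0 : pvCnt graph P v = 0 := by
            have := h3 v hv
            rw [hodv] at this
            have hc := cnt_nonneg graph P v
            have hLc : (0 : Int) ≤ ((List.count v (v :: L) : Nat) : Int) := Int.natCast_nonneg _
            have hone : ((List.count v (v :: L) : Nat) : Int) ≥ 1 := by
              have : 0 < (v :: L).count v := List.count_pos_iff.mpr (by simp)
              exact_mod_cast this
            omega
          have hall : ∀ x ∈ graph.getD v [], 0 ≤ x ∧ x < (graph.length : Int) ∧ x.toNat ∈ P := by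
            unfold pvCnt at hcnt0
            have : (graph.getD v []).countP
                (fun x => decide (¬(0 ≤ x ∧ x < (graph.length : Int) ∧ x.toNat ∈ P))) = 0 := by
              exact_mod_cast hcnt0
            intro x hx
            have := List.countP_eq_zero.mp this x hx
            simpa using this
          refine SafeI.mk _ (Int.natCast_nonneg v) (by simpa using hv) ?_
          intro t htm
          have htm' : t ∈ graph.getD v [] := by simpa using htm
          obtain ⟨ht0, ht1, ht2⟩ := hall t htm'
          have := h8 t.toNat (List.mem_append_left _ ht2)
          rwa [show Int.ofNat t.toNat = t from Int.toNat_of_nonneg ht0] at this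
        apply ih _ _ _ (fun u hu => hL u (by simp [hu]))
        · simp [h1]
        · simp [h2]
        · intro u hu
          rw [hod' u]
          by_cases he : u = v
          · rw [if_pos he, h3 v hv, List.count_cons_self, he]
            push_cast
            ring
          · rw [if_neg he, h3 u hu]
            have : (v :: L).count u = L.count u := by
              rw [List.count_cons]
              simp [Ne.symm he]
            rw [this]
        · intro u hu
          rw [hod' u]
          by_cases he : u = v
          · rw [if_pos he, he]
            rw [getD_set_self _ _ (by omega), hodv]
            simp
          · rw [if_neg he, getD_set_ne _ _ (fun hc => he hc.symm)]
            exact h4 u hu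
        · exact hnd'
        · intro u hu
          rw [← List.append_assoc] at hu
          rcases List.mem_append.mp hu with hm | hm
          · obtain ⟨hlt, hs⟩ := h6 u hm
            refine ⟨hlt, ?_⟩
            by_cases he : u = v
            · rw [he, getD_set_self _ _ (by omega)]
            · rw [getD_set_ne _ _ (fun hc => he hc.symm)]; exact hs
          · simp at hm
            rw [hm]
            exact ⟨hv, by rw [getD_set_self _ _ (by omega)]⟩
        · intro u hu hs
          rw [← List.append_assoc]
          by_cases he : u = v
          · rw [he]
            exact List.mem_append_right _ (by simp)
          · rw [getD_set_ne _ _ (fun hc => he hc.symm)] at hs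
            exact List.mem_append_left _ (h7 u hu hs)
        · intro u hu
          rw [← List.append_assoc] at hu
          rcases List.mem_append.mp hu with hm | hm
          · exact h8 u hm
          · simp at hm
            rw [hm]
            exact hsafev
      · -- outdeg still nonzero: only the decrement
        have hstep : pvRelax (od, safe, pending) v
            = (od.modify v (fun d => d - 1), safe, pending) := by
          unfold pvRelax
          rw [if_neg h0]
        rw [hstep]
        apply ih _ _ _ (fun u hu => hL u (by simp [hu]))
        · simp [h1]
        · exact h2
        · intro u hu
          rw [hod' u]
          by_cases he : u = v
          · rw [if_pos he, h3 v hv, List.count_cons_self, he]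
            push_cast
            ring
          · rw [if_neg he, h3 u hu]
            have : (v :: L).count u = L.count u := by
              rw [List.count_cons]; simp [Ne.symm he]
            rw [this]
        · intro u hu
          rw [hod' u]
          by_cases he : u = v
          · rw [if_pos he, he]
            have h0' : od.getD v 0 - 1 ≠ 0 := by
              have := hod' v
              rw [if_pos rfl] at this
              omega
            constructor
            · intro hs
              have := (h4 v hv).mp hs
              omega
            · intro hle
              exact (h4 v hv).mpr (by omega)
          · rw [if_neg he]
            exact h4 u hu
        · exact h5
        · exact h6
        · exact h7
        · exact h8

lemma nat_nodup_length_le {n : Nat} {l : List Nat} (hnd : l.Nodup) (hb : ∀ u ∈ l, u < n) :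
    l.length ≤ n := by
  have hsub : l ⊆ List.range n := fun u hu => List.mem_range.mpr (hb u hu)
  have := (hnd.subperm hsub).length_le
  simpa using this

lemma bfs_correct (graph : List (List Int)) :
    ∀ (fuel : Nat) (P : List Nat) (od : List Int) (safe : List Bool) (pending : List Nat),
      BfsInv graph P od safe pending → graph.length + 1 ≤ fuel + P.length →
      ∀ u : Nat, u < graph.length →
        ((pvBFS (pvBuildRev graph) fuel od safe pending).getD u false = true ↔ SafeI graph (Int.ofNat u)) := by
  intro fuel
  induction fuel with
  | zero =>
      intro P od safe pending hInv hf
      exfalso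
      have hnd : P.Nodup := hInv.2.2.2.2.1.of_append_left
      have hb : ∀ u ∈ P, u < graph.length := fun u hu => (hInv.2.2.2.2.2.1 u (List.mem_append_left _ hu)).1
      have := nat_nodup_length_le hnd hb
      omega
  | succ fuel ih =>
      intro P od safe pending hInv hf u0
      obtain ⟨h1, h2, h3, h4, h5, h6, h7, h8⟩ := hInv
      cases pending with
      | nil =>
          intro hu0
          show (safe.getD u0 false = true ↔ _)
          constructor
          · intro hs
            have := h8 u0 (h7 u0 hu0 hs)
            exact this
          · intro hS
            -- completeness at the terminal state, by induction on SafeI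
            have hterm : ∀ x : Int, SafeI graph x → safe.getD x.toNat false = true := by
              intro x hx
              induction hx with
              | mk x hx0 hx1 hx ihx =>
                  have hcnt : pvCnt graph P x.toNat = 0 := by
                    unfold pvCnt
                    have : (graph.getD x.toNat []).countP
                        (fun y => decide (¬(0 ≤ y ∧ y < (graph.length : Int) ∧ y.toNat ∈ P))) = 0 := by
                      apply List.countP_eq_zero.mpr
                      intro y hy
                      simp only [decide_eq_true_eq, not_not]
                      obtain ⟨hy0, hy1, -⟩ := SafeI_elim (hx y hy)
                      refine ⟨hy0, by omega, ?_⟩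
                      have := ihx y hy
                      have hmem := h7 y.toNat hy1 this
                      simpa using hmem
                    exact_mod_cast this
                  apply (h4 x.toNat hx1).mpr
                  rw [h3 x.toNat hx1, hcnt]
            exact hterm (Int.ofNat u0) hS
      | cons t rest =>
          intro hu0
          have htmem : t ∈ P ++ t :: rest := List.mem_append_right _ (by simp)
          have ht : t < graph.length := (h6 t htmem).1
          have htP : t ∉ P := by
            intro hc
            have hdisj := (List.nodup_append.mp h5).2.2
            exact hdisj t hc t (by simp) rfl
          have heq : (P ++ [t]) ++ rest = P ++ t :: rest := by simp
          have hfold := relax_fold graph (P ++ [t]) ((pvBuildRev graph).getD t []) od safe rest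
            (fun v hv => buildRev_bound graph t v hv) h1 h2
            (by
              intro u hu
              rw [h3 u hu, cnt_pop P ht htP u, buildRev_count graph t u ht hu])
            h4 (by rw [heq]; exact h5) (by rw [heq]; exact h6) (by rw [heq]; exact h7)
            (by rw [heq]; exact h8)
          exact ih (P ++ [t]) _ _ _ hfold (by simp; omega) u0 hu0

-- ===== VERDICT (by name: the statement is the Claim_ definition above) =====
theorem eventualSafeNodes_spec : Claim_equal_eventualSafeNodes := by
  intro graph _
  unfold Spec_eventualSafeNodes eventualSafeNodes eventualSafeNodes_alt
  -- A's side
  have hInvA : InvA graph [] (List.replicate graph.length none) := by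
    refine ⟨by simp, List.nodup_nil, by simp, ?_⟩
    intro j hj
    simp [List.getD, hj]
  obtain ⟨sA, gA, eA⟩ := loopA_correct graph (graph.length + 2) [] _ hInvA (by simp)
  rw [eA]
  -- B's side
  set od := graph.map (fun nbrs => ((nbrs.length : Int))) with hod
  have hodlen : od.length = graph.length := by simp [hod]
  have hodget : ∀ u : Nat, u < graph.length → od.getD u 0 = (((graph.getD u []).length : Nat) : Int) := by
    intro u hu
    rw [hod]
    simp [List.getD, List.getElem?_map, List.getElem?_eq_getElem hu]
  have hmapget : ∀ u : Nat, u < graph.length →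
      (od.map (fun d => decide (d = 0))).getD u false = decide (od.getD u 0 = 0) := by
    intro u hu
    have hu' : u < od.length := by omega
    simp [List.getD, List.getElem?_map, List.getElem?_eq_getElem hu']
  have hInvB : BfsInv graph [] od (od.map (fun d => decide (d = 0)))
      ((List.range graph.length).filter (fun u => decide (od.getD u 0 = 0))) := by
    refine ⟨hodlen, by simp [hodlen], ?_, ?_, ?_, ?_, ?_, ?_⟩
    · intro u hu
      rw [hodget u hu]
      unfold pvCnt
      have : (graph.getD u []).countP
          (fun x => decide (¬(0 ≤ x ∧ x < (graph.length : Int) ∧ x.toNat ∈ ([] : List Nat)))) =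
          (graph.getD u []).length := List.countP_eq_length.mpr (by intro a _; simp)
      rw [this]
    · intro u hu
      rw [hmapget u hu, hodget u hu]
      simp
    · simp
      exact (List.nodup_range).filter _
    · intro u hu
      simp only [List.nil_append, List.mem_filter, List.mem_range] at hu
      exact ⟨hu.1, by rw [hmapget u hu.1]; exact hu.2⟩
    · intro u hu hs
      rw [hmapget u hu] at hs
      simp only [List.nil_append, List.mem_filter, List.mem_range]
      exact ⟨hu, hs⟩
    · intro u hu
      simp only [List.nil_append, List.mem_filter, List.mem_range] at hu
      have h0 : od.getD u 0 = 0 := by simpa using hu.2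
      rw [hodget u hu.1] at h0
      have hnil : graph.getD u [] = [] := by
        apply List.length_eq_zero_iff.mp
        exact_mod_cast h0
      refine SafeI.mk _ (Int.natCast_nonneg u) (by simpa using hu.1) ?_
      intro t htm
      rw [show (Int.ofNat u).toNat = u from Int.toNat_natCast u, hnil] at htm
      simp at htm
  have hres := bfs_correct graph (graph.length + 1) [] od
      (od.map (fun d => decide (d = 0)))
      ((List.range graph.length).filter (fun u => decide (od.getD u 0 = 0)))
      hInvB (by simp)
  show PySem.List.sorted sA (fun x => x) false
      = ((List.range graph.length).filter (fun u =>
        (pvBFS (pvBuildRev graph) (graph.length + 1) od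
          (od.map (fun d => decide (d = 0)))
          ((List.range graph.length).filter (fun u => decide (od.getD u 0 = 0)))).getD u false)).map
        (fun u => Int.ofNat u)
  have hnodupB : (((List.range graph.length).filter (fun u =>
        (pvBFS (pvBuildRev graph) (graph.length + 1) od
          (od.map (fun d => decide (d = 0)))
          ((List.range graph.length).filter (fun u => decide (od.getD u 0 = 0)))).getD u false)).map
        (fun u => Int.ofNat u)).Nodup :=
    List.Nodup.map (fun a b h => Int.ofNat.inj h) ((List.nodup_range).filter _)
  have hpwB : (((List.range graph.length).filter (fun u =>
        (pvBFS (pvBuildRev graph) (graph.length + 1) od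
          (od.map (fun d => decide (d = 0)))
          ((List.range graph.length).filter (fun u => decide (od.getD u 0 = 0)))).getD u false)).map
        (fun u => Int.ofNat u)).Pairwise (fun a b => a < b) := by
    apply List.Pairwise.map (R := fun a b : Nat => a < b)
    · intro a b hab
      exact Int.ofNat_lt.mpr hab
    · exact (List.pairwise_lt_range).sublist List.filter_sublist
  have hmemB : ∀ x : Int, (x ∈ ((List.range graph.length).filter (fun u =>
        (pvBFS (pvBuildRev graph) (graph.length + 1) od
          (od.map (fun d => decide (d = 0)))
          ((List.range graph.length).filter (fun u => decide (od.getD u 0 = 0)))).getD u false)).map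
        (fun u => Int.ofNat u)) ↔ SafeI graph x := by
    intro x
    constructor
    · intro hx
      obtain ⟨u, hu, rfl⟩ := List.mem_map.mp hx
      obtain ⟨hur, hus⟩ := List.mem_filter.mp hu
      exact (hres u (List.mem_range.mp hur)).mp hus
    · intro hx
      obtain ⟨h0, h1, -⟩ := SafeI_elim hx
      refine List.mem_map.mpr ⟨x.toNat, ?_, Int.toNat_of_nonneg h0⟩
      refine List.mem_filter.mpr ⟨List.mem_range.mpr h1, ?_⟩
      exact (hres x.toNat h1).mpr (by rwa [show Int.ofNat x.toNat = x from Int.toNat_of_nonneg h0])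
  have hperm : (((List.range graph.length).filter (fun u =>
        (pvBFS (pvBuildRev graph) (graph.length + 1) od
          (od.map (fun d => decide (d = 0)))
          ((List.range graph.length).filter (fun u => decide (od.getD u 0 = 0)))).getD u false)).map
        (fun u => Int.ofNat u)).Perm sA :=
    (List.perm_ext_iff_of_nodup hnodupB gA.1).mpr (fun a => (hmemB a).trans (gA.2 a).symm)
  exact PySem.List.sorted_eq_of_perm_of_pairwise_lt _ _ _ hperm hpwB
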